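-- pv_equiv track=rewrite | github.com/rodionov-alex/InformaticsPython | _2023/#8/Поляков/p8_v5.py | to_12
-- ===== SOURCE A (Python) =====
-- def to_12(number):
--     res = ''
--
--     while number != 0:
--         ost = number % 12
--
--         if ost == 10:
--             ost = 'a'
--         elif ost == 11:
--             ost = 'b'
--         else:
--             ost = str(ost)
--
--         res = ost + res
--         number //= 12
--
--     return res
-- ===== SOURCE B (Python) =====
-- def to_12(number):
--     if number == 0:
--         return ''
--     return to_12(number // 12) + '0123456789ab'[number % 12]
-- ===== Notes on version B (the rewrite author's own statement) =====
-- stated objective: simpler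
-- what changed: Replaces the while-loop with string-prepend and the if/elif digit chain by a recursion on number//12 that appends a digit taken from a lookup string '0123456789ab'.
import Mathlib
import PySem

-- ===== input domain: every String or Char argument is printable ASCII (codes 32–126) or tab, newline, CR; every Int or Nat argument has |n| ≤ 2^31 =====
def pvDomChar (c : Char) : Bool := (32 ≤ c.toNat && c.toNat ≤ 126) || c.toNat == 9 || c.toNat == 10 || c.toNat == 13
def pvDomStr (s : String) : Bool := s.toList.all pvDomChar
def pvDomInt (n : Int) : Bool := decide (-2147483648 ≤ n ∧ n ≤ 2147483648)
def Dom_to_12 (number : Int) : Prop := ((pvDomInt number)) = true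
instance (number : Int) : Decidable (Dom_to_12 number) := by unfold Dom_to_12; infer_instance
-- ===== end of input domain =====

-- B replaces A's while-loop/prepend and if-elif digit chain by a recursion on number//12
-- with a lookup-string digit; equal on all nonnegative ints (A loops forever on negatives).


-- ===== PORT A =====
-- A's while-loop, fuel-bounded: number.toNat + 1 iterations always suffice on the
-- nonnegative domain (number strictly shrinks under //12); Python diverges on negatives.
def to12Loop : Nat → Int → String → String
  | 0, _, res => res
  | fuel + 1, number, res =>
    if number = 0 then res
    else
      let ost := PySem.Int.mod number 12
      let ostS : String := if ost = 10 then "a" else if ost = 11 then "b" else PySem.Int.toStr ost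
      to12Loop fuel (PySem.Int.floordiv number 12) (ostS ++ res)

def to_12 (number : Int) : String := to12Loop (number.toNat + 1) number ""

-- ===== PORT B =====
def to12Rec : Nat → Int → String
  | 0, _ => ""
  | fuel + 1, number =>
    if number = 0 then ""
    else
      to12Rec fuel (PySem.Int.floordiv number 12) ++
        (((PySem.Str.pyGet? "0123456789ab" (PySem.Int.mod number 12)).map (fun c => String.mk [c])).getD "")

def to_12_alt (number : Int) : String := to12Rec (number.toNat + 1) number

-- ===== PRECONDITION & SPEC =====
-- Pre_ excludes negatives: there Python A loops forever and Python B raises RecursionError.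
def Pre_to_12 (number : Int) : Prop := 0 ≤ number
instance (number : Int) : Decidable (Pre_to_12 number) := by unfold Pre_to_12; infer_instance
def pvWitness_to_12 : Int := (157)

def Spec_to_12 (number : Int) (out : String) : Prop := out = to_12_alt number
instance (number : Int) (out : String) : Decidable (Spec_to_12 number out) := by unfold Spec_to_12; infer_instance

-- ===== CLAIM (what is proved, stated in full; the proofs are below) =====
def Claim_equal_to_12 : Prop := ∀ (number : Int), Dom_to_12 number → Pre_to_12 number → Spec_to_12 number (to_12 number)

-- ===== LEMMAS AND PROOFS =====

theorem digit_eq (n : Int) (h : 0 < n) :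
    (if PySem.Int.mod n 12 = 10 then "a" else if PySem.Int.mod n 12 = 11 then "b"
     else PySem.Int.toStr (PySem.Int.mod n 12))
    = ((PySem.Str.pyGet? "0123456789ab" (PySem.Int.mod n 12)).map (fun c => String.mk [c])).getD "" := by
  have h0 : 0 ≤ PySem.Int.mod n 12 := PySem.Int.mod_nonneg n (by norm_num)
  have h1 : PySem.Int.mod n 12 < 12 := PySem.Int.mod_lt n (by norm_num)
  interval_cases (PySem.Int.mod n 12) <;> decide

theorem loop_eq_rec (fuel : Nat) : ∀ (n : Int) (res : String), 0 ≤ n →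
    to12Loop fuel n res = to12Rec fuel n ++ res := by
  induction fuel with
  | zero => intro n res _; simp [to12Loop, to12Rec]
  | succ f ih =>
    intro n res hn
    by_cases h0 : n = 0
    · simp [to12Loop, to12Rec, h0]
    · have hpos : 0 < n := lt_of_le_of_ne hn (Ne.symm h0)
      have hq : 0 ≤ PySem.Int.floordiv n 12 := by
        have := PySem.Int.le_floordiv_iff_mul_le (a := n) (b := 12) (q := 0) (by norm_num)
        omega
      simp only [to12Loop, to12Rec, if_neg h0]
      rw [ih _ _ hq, digit_eq n hpos, ← String.append_assoc]

theorem to_12_spec : Claim_equal_to_12 := by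
  intro n _ hpre
  show to_12 n = to_12_alt n
  unfold to_12 to_12_alt
  rw [loop_eq_rec _ _ _ hpre]
  simp
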